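-- pv_equiv track=rewrite | github.com/K-Sqr/python-problem-sets | Python Solutions/Unit2_S1_Strings.py | keys_v_values
-- ===== SOURCE A (Python) =====
-- def keys_v_values(d):
--     key_tot = 0
--     val_tot = 0
--     for k in d.keys():
--         key_tot += k
--     for val in d.values():
--         val_tot += val
--     if key_tot > val_tot:
--         return "Keys"
--     elif key_tot < val_tot:
--         return "Values"
--     else:
--         return "Balanced"
-- ===== SOURCE B (Python) =====
-- def keys_v_values(d):
--     diffs = [k - v for k, v in d.items()]
--     while len(diffs) > 1:
--         nxt = [diffs[i] + diffs[i + 1] for i in range(0, len(diffs) - 1, 2)]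
--         if len(diffs) % 2:
--             nxt.append(diffs[-1])
--         diffs = nxt
--     t = diffs[0] if diffs else 0
--     return "Keys" if t > 0 else "Values" if t < 0 else "Balanced"
-- ===== Notes on version B (the rewrite author's own statement) =====
-- stated objective: alternative
-- what changed: Bottom-up pairwise (tournament) reduction: the per-item signed differences k-v are repeatedly combined in adjacent pairs until one number is left, whose sign picks the answer, instead of two accumulation loops over keys() and values() whose totals are compared.
import Mathlib
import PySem

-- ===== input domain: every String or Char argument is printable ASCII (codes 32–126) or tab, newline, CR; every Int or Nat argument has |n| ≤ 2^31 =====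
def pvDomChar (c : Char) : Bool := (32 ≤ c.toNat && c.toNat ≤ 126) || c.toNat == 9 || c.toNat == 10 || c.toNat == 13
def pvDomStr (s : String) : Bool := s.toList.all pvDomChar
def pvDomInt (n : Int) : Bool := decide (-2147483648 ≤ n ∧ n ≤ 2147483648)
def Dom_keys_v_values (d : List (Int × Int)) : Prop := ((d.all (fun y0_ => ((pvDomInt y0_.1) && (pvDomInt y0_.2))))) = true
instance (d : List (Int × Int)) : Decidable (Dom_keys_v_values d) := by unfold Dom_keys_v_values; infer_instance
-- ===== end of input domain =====

-- B replaces A's two accumulation loops (sum keys, sum values, compare) by an iterative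
-- bottom-up pairwise (tournament) reduction of the per-item signed differences k - v;
-- the sign of the surviving number picks the answer.

-- ===== PORT A =====
def keys_v_values (d : List (Int × Int)) : String :=
  let key_tot : Int := (d.map Prod.fst).foldl (fun acc k => acc + k) 0
  let val_tot : Int := (d.map Prod.snd).foldl (fun acc v => acc + v) 0
  if key_tot > val_tot then "Keys"
  else if key_tot < val_tot then "Values"
  else "Balanced"

-- ===== PORT B =====
-- one round of Source B's while-body: adjacent pairs summed, odd leftover kept
def pvPairUp : List Int → List Int
  | a :: b :: t => (a + b) :: pvPairUp t
  | l => l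

-- Source B's while-loop; the Nat fuel (initial list length suffices) only makes it total
def pvLoop : Nat → List Int → List Int
  | 0, l => l
  | n + 1, l => if l.length > 1 then pvLoop n (pvPairUp l) else l

def keys_v_values_alt (d : List (Int × Int)) : String :=
  let diffs : List Int := d.map (fun kv => kv.1 - kv.2)
  let t : Int := (pvLoop diffs.length diffs).headD 0
  if t > 0 then "Keys" else if t < 0 then "Values" else "Balanced"

-- ===== PRECONDITION & SPEC =====
def Spec_keys_v_values (d : List (Int × Int)) (out : String) : Prop := out = keys_v_values_alt d
instance (d : List (Int × Int)) (out : String) : Decidable (Spec_keys_v_values d out) := by unfold Spec_keys_v_values; infer_instance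

-- ===== CLAIM (what is proved, stated in full; the proofs are below) =====
def Claim_equal_keys_v_values : Prop := ∀ (d : List (Int × Int)), Dom_keys_v_values d → Spec_keys_v_values d (keys_v_values d)

-- ===== LEMMAS AND PROOFS =====
theorem pvPairUp_fallback (l : List Int) (h : ∀ (a b : Int) (t : List Int), l = a :: b :: t → False) :
    pvPairUp l = l := by
  match l with
  | [] => rfl
  | [x] => rfl
  | a :: b :: t => exact absurd rfl (h a b t)

theorem pvPairUp_sum (l : List Int) : (pvPairUp l).sum = l.sum := by
  induction l using pvPairUp.induct with
  | case1 a b t ih => simp [pvPairUp, ih]; ring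
  | case2 l h => rw [pvPairUp_fallback l h]

theorem pvPairUp_len_le (l : List Int) : (pvPairUp l).length ≤ l.length := by
  induction l using pvPairUp.induct with
  | case1 a b t ih => simp [pvPairUp]; omega
  | case2 l h => rw [pvPairUp_fallback l h]

theorem pvPairUp_len_lt (l : List Int) (h : 2 ≤ l.length) :
    (pvPairUp l).length < l.length := by
  match l, h with
  | a :: b :: t, _ =>
    have := pvPairUp_len_le t
    simp [pvPairUp]; omega

theorem pvLoop_sum (n : Nat) (l : List Int) : (pvLoop n l).sum = l.sum := by
  induction n generalizing l with
  | zero => rfl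
  | succ n ih =>
    simp only [pvLoop]
    split_ifs
    · rw [ih, pvPairUp_sum]
    · rfl

theorem pvLoop_len (n : Nat) (l : List Int) (h : l.length ≤ n) :
    (pvLoop n l).length ≤ 1 := by
  induction n generalizing l with
  | zero => simp_all [pvLoop]
  | succ n ih =>
    simp only [pvLoop]
    split_ifs with hl
    · exact ih _ (by have := pvPairUp_len_lt l (by omega); omega)
    · omega

theorem pvLoop_headD (l : List Int) : (pvLoop l.length l).headD 0 = l.sum := by
  have hs := pvLoop_sum l.length l
  have hlen := pvLoop_len l.length l le_rfl
  match hr : pvLoop l.length l with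
  | [] => rw [hr] at hs; simpa using hs
  | [x] => rw [hr] at hs; simpa using hs
  | x :: y :: t => rw [hr] at hlen; simp at hlen

theorem pv_map_sub_sum (l : List (Int × Int)) :
    (l.map (fun kv => kv.1 - kv.2)).sum = (l.map Prod.fst).sum - (l.map Prod.snd).sum := by
  induction l with
  | nil => rfl
  | cons kv t ih => simp [ih]; ring

theorem foldl_add_sum (l : List Int) (a : Int) :
    l.foldl (fun acc k => acc + k) a = a + l.sum := by
  induction l generalizing a with
  | nil => simp
  | cons x t ih => simp [List.foldl, ih, add_assoc]

-- ===== VERDICT (by name: the statement is the Claim_ definition above) =====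
theorem keys_v_values_spec : Claim_equal_keys_v_values := by
  intro d _
  unfold Spec_keys_v_values keys_v_values keys_v_values_alt
  have ht := pvLoop_headD (d.map (fun kv => kv.1 - kv.2))
  rw [pv_map_sub_sum] at ht
  have hk := foldl_add_sum (d.map Prod.fst) 0
  have hv := foldl_add_sum (d.map Prod.snd) 0
  simp only [List.length_map] at *
  split_ifs <;> first | rfl | omega
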